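-- pv_equiv track=rewrite | github.com/AlexanderVVasilenko/Gimno | Module14/07_years/main.py | is_year_have_3_same_digits
-- ===== SOURCE A (Python) =====
-- def is_year_have_3_same_digits(year: int):
--     last_digit_counter = 1
--     prelast_digit_counter = 1
--     first_digit = year % 10
--     second_digit = (year // 10) % 10
--     if first_digit == second_digit:
--         last_digit_counter += 1
--     year_ = year // 100
--     for _ in range(2):
--         if year_ % 10 == first_digit:
--             last_digit_counter += 1
--         elif year_ % 10 == second_digit:
--             prelast_digit_counter += 1
--         year_ //= 10
--     if last_digit_counter >= 3 or prelast_digit_counter >= 3: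
--         return True
-- ===== SOURCE B (Python) =====
-- def is_year_have_3_same_digits(year: int):
--     digits = [year % 10, (year // 10) % 10, (year // 100) % 10, (year // 1000) % 10]
--     if max(digits.count(d) for d in digits) >= 3:
--         return True
-- ===== Notes on version B (the rewrite author's own statement) =====
-- stated objective: simpler
-- what changed: Replaces A's two position-specific accumulators with elif logic by building the list of the four lowest digits once and testing whether the maximum digit frequency is at least 3.
import Mathlib
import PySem

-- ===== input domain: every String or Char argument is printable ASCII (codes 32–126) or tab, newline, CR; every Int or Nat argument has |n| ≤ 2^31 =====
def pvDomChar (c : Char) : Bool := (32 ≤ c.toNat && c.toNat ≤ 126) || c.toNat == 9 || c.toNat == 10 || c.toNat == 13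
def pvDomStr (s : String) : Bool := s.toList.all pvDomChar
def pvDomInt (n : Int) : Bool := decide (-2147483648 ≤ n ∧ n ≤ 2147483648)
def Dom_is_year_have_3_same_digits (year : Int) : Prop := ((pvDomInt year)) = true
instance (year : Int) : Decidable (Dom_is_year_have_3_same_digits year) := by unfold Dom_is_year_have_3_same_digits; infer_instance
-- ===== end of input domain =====

-- B replaces A’s two position-specific counters and elif chain by a symmetric digit-frequency check (simpler).


-- ===== PORT A =====
def is_year_have_3_same_digits (year : Int) : Option Bool :=
  let last_digit_counter : Int := 1
  let prelast_digit_counter : Int := 1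
  let first_digit := PySem.Int.mod year 10
  let second_digit := PySem.Int.mod (PySem.Int.floordiv year 10) 10
  let last_digit_counter := if first_digit = second_digit then last_digit_counter + 1 else last_digit_counter
  let year_ := PySem.Int.floordiv year 100
  let st := (PySem.List.pyRange 0 2 1).foldl
    (fun (st : Int × Int × Int) _ =>
      if PySem.Int.mod st.2.2 10 = first_digit then (st.1 + 1, st.2.1, PySem.Int.floordiv st.2.2 10)
      else if PySem.Int.mod st.2.2 10 = second_digit then (st.1, st.2.1 + 1, PySem.Int.floordiv st.2.2 10)
      else (st.1, st.2.1, PySem.Int.floordiv st.2.2 10))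
    (last_digit_counter, prelast_digit_counter, year_)
  if st.1 ≥ 3 ∨ st.2.1 ≥ 3 then some true else none

-- ===== PORT B =====
def is_year_have_3_same_digits_alt (year : Int) : Option Bool :=
  let digits : List Int := [PySem.Int.mod year 10, PySem.Int.mod (PySem.Int.floordiv year 10) 10,
    PySem.Int.mod (PySem.Int.floordiv year 100) 10, PySem.Int.mod (PySem.Int.floordiv year 1000) 10]
  match PySem.List.max? (digits.map (fun d => (PySem.List.count digits d : Int))) (fun x => x) with
  | some m => if m ≥ 3 then some true else none
  | none => none

-- ===== PRECONDITION & SPEC =====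
def Spec_is_year_have_3_same_digits (year : Int) (out : Option Bool) : Prop := out = is_year_have_3_same_digits_alt year
instance (year : Int) (out : Option Bool) : Decidable (Spec_is_year_have_3_same_digits year out) := by unfold Spec_is_year_have_3_same_digits; infer_instance

-- ===== CLAIM (what is proved, stated in full; the proofs are below) =====
def Claim_equal_is_year_have_3_same_digits : Prop := ∀ (year : Int), Dom_is_year_have_3_same_digits year → Spec_is_year_have_3_same_digits year (is_year_have_3_same_digits year)

-- ===== LEMMAS AND PROOFS =====

-- ===== LEMMAS =====
-- floor-division composition used to align A's loop state with B's fourth digit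
lemma pv_fdfd (year : Int) :
    PySem.Int.floordiv (PySem.Int.floordiv year 100) 10 = PySem.Int.floordiv year 1000 := by
  rw [PySem.Int.floordiv_eq_ediv_of_pos (by norm_num), PySem.Int.floordiv_eq_ediv_of_pos (by norm_num),
      PySem.Int.floordiv_eq_ediv_of_pos (by norm_num),
      Int.ediv_ediv_of_nonneg (by norm_num : (0:Int) ≤ 100)]
  norm_num

-- ===== VERDICT (by name: the statement is the Claim_ definition above) =====
set_option maxHeartbeats 2000000 in
theorem is_year_have_3_same_digits_spec : Claim_equal_is_year_have_3_same_digits := by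
  intro year _
  unfold Spec_is_year_have_3_same_digits
  simp only [is_year_have_3_same_digits, is_year_have_3_same_digits_alt,
    show PySem.List.pyRange 0 2 1 = [0,1] from by decide, List.foldl, pv_fdfd]
  simp only [apply_ite (Prod.snd : Int × Int × Int → Int × Int),
    apply_ite (Prod.snd : Int × Int → Int), apply_ite (Prod.fst : Int × Int × Int → Int),
    apply_ite (Prod.fst : Int × Int → Int), ite_self]
  generalize PySem.Int.mod year 10 = a
  generalize PySem.Int.mod (PySem.Int.floordiv year 10) 10 = b
  generalize PySem.Int.mod (PySem.Int.floordiv year 100) 10 = c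
  generalize PySem.Int.mod (PySem.Int.floordiv year 1000) 10 = d
  by_cases h1 : b = a <;> by_cases h2 : c = a <;> by_cases h3 : d = a <;>
    by_cases h4 : c = b <;> by_cases h5 : d = b <;> by_cases h6 : d = c <;>
    simp_all [PySem.List.max?, List.count_cons] <;> (try split_ifs) <;> simp_all
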